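-- pv_equiv track=rewrite | github.com/orianhit/leet_code | 980.py | _find_start_cell_and_walk_count
-- ===== SOURCE A (Python) =====
-- def _find_start_cell_and_walk_count(grid):
--     starting_cell = (0, 0)
--     walk_count = 0
--     for idx, row in enumerate(grid):
--         for idxx, cell in enumerate(row):
--             if cell == 1:
--                 starting_cell = (idx, idxx)
--             if cell == 0:
--                 walk_count += 1
--     return starting_cell, walk_count
-- ===== SOURCE B (Python) =====
-- def _find_start_cell_and_walk_count(grid):
--     walk_count = sum(1 for row in grid for cell in row if cell == 0)
--     starting_cell = next(((i, j)
--                           for i in reversed(range(len(grid)))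
--                           for j in reversed(range(len(grid[i])))
--                           if grid[i][j] == 1), (0, 0))
--     return starting_cell, walk_count
-- ===== Notes on version B (the rewrite author's own statement) =====
-- stated objective: alternative
-- what changed: Replaces the single interleaved loop that rewrites both accumulators with two independent passes: a flat sum-comprehension counting zeros, and a reverse-order scan returning the first 1 it meets (the last 1 in forward order), defaulting to (0,0).
import Mathlib
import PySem

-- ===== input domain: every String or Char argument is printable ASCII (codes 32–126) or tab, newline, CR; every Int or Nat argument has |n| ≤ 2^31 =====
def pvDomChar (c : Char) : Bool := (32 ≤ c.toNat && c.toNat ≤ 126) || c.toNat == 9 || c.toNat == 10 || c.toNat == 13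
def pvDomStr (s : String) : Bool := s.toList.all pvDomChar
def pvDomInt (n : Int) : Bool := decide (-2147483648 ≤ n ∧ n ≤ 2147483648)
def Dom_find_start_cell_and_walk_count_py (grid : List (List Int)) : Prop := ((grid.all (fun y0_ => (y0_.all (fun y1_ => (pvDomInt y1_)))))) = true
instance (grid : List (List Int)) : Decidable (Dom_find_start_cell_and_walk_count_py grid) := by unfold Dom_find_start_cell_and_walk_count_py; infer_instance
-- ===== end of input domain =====

-- ===== PORT A =====
-- B changes: two separate passes (zero-count sum, then reverse scan for the last 1) instead of A's single interleaved loop; objective: alternative decomposition, same cost.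
def pvAgoRow (idx idxx : Int) (start : Int × Int) (cnt : Int) (row : List Int) : (Int × Int) × Int :=
  match row with
  | [] => (start, cnt)
  | c :: rest =>
    let start := if c == 1 then (idx, idxx) else start
    let cnt := if c == 0 then cnt + 1 else cnt
    pvAgoRow idx (idxx + 1) start cnt rest

def pvAgoGrid (idx : Int) (start : Int × Int) (cnt : Int) (grid : List (List Int)) : (Int × Int) × Int :=
  match grid with
  | [] => (start, cnt)
  | r :: rest =>
    let sc := pvAgoRow idx 0 start cnt r
    pvAgoGrid (idx + 1) sc.1 sc.2 rest

def find_start_cell_and_walk_count_py (grid : List (List Int)) : (Int × Int) × Int :=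
  pvAgoGrid 0 (0, 0) 0 grid

-- ===== PORT B =====
-- reverse scan of one row: index of the first 1 seen from the right (recursing on the tail first mirrors the reversed iteration)
def pvBlastOne (row : List Int) : Option Nat :=
  match row with
  | [] => none
  | c :: rest =>
    match pvBlastOne rest with
    | some j => some (j + 1)
    | none => if c == 1 then some 0 else none

def pvBlastOneCell (grid : List (List Int)) : Option (Nat × Nat) :=
  match grid with
  | [] => none
  | r :: rest =>
    match pvBlastOneCell rest with
    | some p => some (p.1 + 1, p.2)
    | none => (pvBlastOne r).map (fun j => (0, j))

def find_start_cell_and_walk_count_py_alt (grid : List (List Int)) : (Int × Int) × Int :=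
  let walk_count : Int := (grid.map (fun row => ((row.filter (fun c => c == 0)).length : Int))).sum
  let starting_cell : Int × Int :=
    match pvBlastOneCell grid with
    | some p => ((p.1 : Int), (p.2 : Int))
    | none => (0, 0)
  (starting_cell, walk_count)

-- ===== PRECONDITION & SPEC =====
def Spec_find_start_cell_and_walk_count_py (grid : List (List Int)) (out : (Int × Int) × Int) : Prop := out = find_start_cell_and_walk_count_py_alt grid
instance (grid : List (List Int)) (out : (Int × Int) × Int) : Decidable (Spec_find_start_cell_and_walk_count_py grid out) := by unfold Spec_find_start_cell_and_walk_count_py; infer_instance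

-- ===== CLAIM (what is proved, stated in full; the proofs are below) =====
def Claim_equal_find_start_cell_and_walk_count_py : Prop := ∀ (grid : List (List Int)), Dom_find_start_cell_and_walk_count_py grid → Spec_find_start_cell_and_walk_count_py grid (find_start_cell_and_walk_count_py grid)

-- ===== LEMMAS AND PROOFS =====
theorem pvAgoRow_eq (row : List Int) : ∀ (idx idxx : Int) (start : Int × Int) (cnt : Int),
    pvAgoRow idx idxx start cnt row =
      ((match pvBlastOne row with
        | some j => (idx, idxx + (j : Int))
        | none => start),
       cnt + ((row.filter (fun c => c == 0)).length : Int)) := by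
  induction row with
  | nil => intro idx idxx start cnt; simp [pvAgoRow, pvBlastOne]
  | cons c rest ih =>
    intro idx idxx start cnt
    simp only [pvAgoRow, ih, pvBlastOne, List.filter_cons]
    cases h : pvBlastOne rest with
    | some j =>
      by_cases hc : c = 0 <;> simp [hc, Prod.ext_iff] <;> push_cast <;> omega
    | none =>
      by_cases h1 : c = 1 <;> by_cases hc : c = 0 <;>
        simp [h1, hc, Prod.ext_iff] <;> push_cast <;> omega

theorem pvAgoGrid_eq (grid : List (List Int)) : ∀ (idx : Int) (start : Int × Int) (cnt : Int),
    pvAgoGrid idx start cnt grid =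
      ((match pvBlastOneCell grid with
        | some p => (idx + (p.1 : Int), (p.2 : Int))
        | none => start),
       cnt + (grid.map (fun row => ((row.filter (fun c => c == 0)).length : Int))).sum) := by
  induction grid with
  | nil => intro idx start cnt; simp [pvAgoGrid, pvBlastOneCell]
  | cons r rest ih =>
    intro idx start cnt
    simp only [pvAgoGrid, pvAgoRow_eq, ih, pvBlastOneCell, List.map, List.sum_cons]
    cases hr : pvBlastOneCell rest with
    | some p =>
      simp [Prod.ext_iff]
      constructor
      · push_cast; ring
      · ring
    | none =>
      cases h1 : pvBlastOne r with
      | some j => simp [Prod.ext_iff]; ring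
      | none => simp [Prod.ext_iff]; ring

-- ===== VERDICT (by name: the statement is the Claim_ definition above) =====
theorem find_start_cell_and_walk_count_py_spec : Claim_equal_find_start_cell_and_walk_count_py := by
  intro grid _
  unfold Spec_find_start_cell_and_walk_count_py
  unfold find_start_cell_and_walk_count_py find_start_cell_and_walk_count_py_alt
  rw [pvAgoGrid_eq]
  cases h : pvBlastOneCell grid with
  | some p => simp [h]
  | none => simp [h]
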